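-- pv_equiv track=rewrite | github.com/MrBrantCode/unitest_baseline | mut_generate/mist_train_cf/cf_7384/solution.py | find_longest_string
-- ===== SOURCE A (Python) =====
-- def find_longest_string(strings):
--     longest_string = ""
--     longest_string_length = 0
--     longest_string_uppercase_count = 0
--
--     for string in strings:
--         uppercase_count = sum(1 for char in string if char.isupper())
--
--         if uppercase_count > 0 and len(string) > longest_string_length:
--             uppercase_chars = [char for char in string if char.isupper()]
--             if uppercase_chars == sorted(uppercase_chars):
--                 longest_string = string
--                 longest_string_length = len(string)
--                 longest_string_uppercase_count = uppercase_count
--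
--     return longest_string, longest_string_uppercase_count
-- ===== SOURCE B (Python) =====
-- def find_longest_string(strings):
--     def valid(s):
--         ups = [c for c in s if c.isupper()]
--         return ups != [] and ups == sorted(ups)
--
--     candidates = [s for s in strings if valid(s)]
--     if not candidates:
--         return "", 0
--     best = max(candidates, key=len)
--     return best, sum(1 for c in best if c.isupper())
-- ===== Notes on version B (the rewrite author's own statement) =====
-- stated objective: alternative
-- what changed: Replaces the three-variable running-max accumulator with a filter of the valid strings followed by max(candidates, key=len) and a recount on the winner.
import Mathlib
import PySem

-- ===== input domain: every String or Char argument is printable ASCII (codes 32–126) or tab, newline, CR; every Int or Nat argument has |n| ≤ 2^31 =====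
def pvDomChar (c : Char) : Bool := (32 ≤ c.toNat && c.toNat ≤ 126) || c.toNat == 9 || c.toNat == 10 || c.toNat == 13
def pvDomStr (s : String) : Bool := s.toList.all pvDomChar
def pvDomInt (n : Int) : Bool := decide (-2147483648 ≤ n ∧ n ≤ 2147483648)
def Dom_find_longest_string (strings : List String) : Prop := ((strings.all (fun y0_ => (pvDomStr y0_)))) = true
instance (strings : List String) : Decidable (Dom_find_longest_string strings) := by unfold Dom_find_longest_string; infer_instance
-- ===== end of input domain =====

-- B replaces A's running-max accumulator loop by filter-valid-then-max(key=len): same result, plainer pipeline (no speed claim).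

-- ===== PORT A =====
-- sum(1 for char in string if char.isupper())
def pvUpCount (s : String) : Int := ((s.toList.filter PySem.Chars.isupper).length : Int)

def find_longest_string (strings : List String) : String × Int :=
  let r := strings.foldl (fun (st : String × Int × Int) s =>
    let uc := pvUpCount s
    if uc > 0 ∧ (s.toList.length : Int) > st.2.1 then
      let ups := s.toList.filter PySem.Chars.isupper
      if ups = PySem.List.sorted ups (fun c => c) false then (s, ((s.toList.length : Nat) : Int), uc)
      else st
    else st) ("", 0, 0)
  (r.1, r.2.2)

-- ===== PORT B =====
-- valid(s): ups != [] and ups == sorted(ups)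
def pvValid (s : String) : Bool :=
  let ups := s.toList.filter PySem.Chars.isupper
  ups ≠ [] && ups = PySem.List.sorted ups (fun c => c) false

def find_longest_string_alt (strings : List String) : String × Int :=
  let candidates := strings.filter pvValid
  match PySem.List.max? candidates (fun s => s.toList.length) with
  | none => ("", 0)
  | some best => (best, ((best.toList.filter PySem.Chars.isupper).length : Int))

-- ===== PRECONDITION & SPEC =====
def Spec_find_longest_string (strings : List String) (out : String × Int) : Prop := out = find_longest_string_alt strings
instance (strings : List String) (out : String × Int) : Decidable (Spec_find_longest_string strings out) := by unfold Spec_find_longest_string; infer_instance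

-- ===== CLAIM (what is proved, stated in full; the proofs are below) =====
def Claim_equal_find_longest_string : Prop := ∀ (strings : List String), Dom_find_longest_string strings → Spec_find_longest_string strings (find_longest_string strings)

-- ===== LEMMAS AND PROOFS =====

-- max? on a cons is the first-strict-max left fold
theorem pv_max?_cons (x : String) (t : List String) (key : String → Nat) :
    PySem.List.max? (x :: t) key = some (t.foldl (fun m y => if key m < key y then y else m) x) := by
  simp only [PySem.List.max?]
  induction t generalizing x with
  | nil => rfl
  | cons y t ih =>
    simp only [List.foldl_cons]
    split <;> exact ih _

-- valid strings are nonempty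
theorem pv_valid_pos (s : String) (h : pvValid s = true) : 0 < s.toList.length := by
  simp only [pvValid, Bool.and_eq_true, ne_eq, decide_eq_true_eq] at h
  have := h.1
  cases hs : s.toList with
  | nil => simp [hs] at this
  | cons _ _ => simp

-- main loop invariant
theorem pv_loop (l : List String) (b : String) :
    l.foldl (fun (st : String × Int × Int) s =>
      let uc := pvUpCount s
      if uc > 0 ∧ (s.toList.length : Int) > st.2.1 then
        let ups := s.toList.filter PySem.Chars.isupper
        if ups = PySem.List.sorted ups (fun c => c) false then (s, ((s.toList.length : Nat) : Int), uc)
        else st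
      else st) (b, (b.toList.length : Int), pvUpCount b)
    = (let m := (l.filter pvValid).foldl (fun m y => if m.toList.length < y.toList.length then y else m) b
       (m, (m.toList.length : Int), pvUpCount m)) := by
  induction l generalizing b with
  | nil => rfl
  | cons x l ih =>
    simp only [List.foldl_cons, List.filter_cons]
    by_cases hv : pvValid x = true
    · have hsorted : x.toList.filter PySem.Chars.isupper
          = PySem.List.sorted (x.toList.filter PySem.Chars.isupper) (fun c => c) false := by
        simp only [pvValid, Bool.and_eq_true, decide_eq_true_eq] at hv
        exact hv.2
      have huc : pvUpCount x > 0 := by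
        have hne : x.toList.filter PySem.Chars.isupper ≠ [] := by
          simp only [pvValid, Bool.and_eq_true, ne_eq, decide_eq_true_eq] at hv
          exact hv.1
        have : 0 < (x.toList.filter PySem.Chars.isupper).length := List.length_pos_iff.mpr hne
        simp only [pvUpCount]
        exact_mod_cast this
      rw [if_pos hv]
      by_cases hlen : b.toList.length < x.toList.length
      · have hcond : pvUpCount x > 0 ∧ ((x.toList.length : Nat) : Int) > ((b.toList.length : Nat) : Int) := ⟨huc, by exact_mod_cast hlen⟩
        show List.foldl _ (if pvUpCount x > 0 ∧ ((x.toList.length : Nat) : Int) > ((b.toList.length : Nat) : Int) then _ else _) l = _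
        rw [if_pos hcond, if_pos hsorted, List.foldl_cons, if_pos hlen]
        exact ih x
      · have hcond : ¬ (pvUpCount x > 0 ∧ ((x.toList.length : Nat) : Int) > ((b.toList.length : Nat) : Int)) := by
          intro h
          exact hlen (by exact_mod_cast h.2)
        show List.foldl _ (if pvUpCount x > 0 ∧ ((x.toList.length : Nat) : Int) > ((b.toList.length : Nat) : Int) then _ else _) l = _
        rw [if_neg hcond, List.foldl_cons, if_neg hlen]
        exact ih b
    · rw [if_neg hv]
      by_cases hcond : pvUpCount x > 0 ∧ ((x.toList.length : Nat) : Int) > ((b.toList.length : Nat) : Int)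
      · have hns : ¬ (x.toList.filter PySem.Chars.isupper
            = PySem.List.sorted (x.toList.filter PySem.Chars.isupper) (fun c => c) false) := by
          intro h
          apply hv
          simp only [pvValid, Bool.and_eq_true, ne_eq, decide_eq_true_eq]
          refine ⟨?_, h⟩
          intro hnil
          have h1 := hcond.1
          simp only [pvUpCount, hnil] at h1
          simp at h1
        show List.foldl _ (if pvUpCount x > 0 ∧ ((x.toList.length : Nat) : Int) > ((b.toList.length : Nat) : Int) then _ else _) l = _
        rw [if_pos hcond, if_neg hns]
        exact ih b
      · show List.foldl _ (if pvUpCount x > 0 ∧ ((x.toList.length : Nat) : Int) > ((b.toList.length : Nat) : Int) then _ else _) l = _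
        rw [if_neg hcond]
        exact ih b

-- ===== VERDICT (by name: the statement is the Claim_ definition above) =====
theorem find_longest_string_spec : Claim_equal_find_longest_string := by
  intro strings _
  unfold Spec_find_longest_string find_longest_string find_longest_string_alt
  have h0 : (("" : String), (0 : Int), (0 : Int)) = (("" : String), (("".toList.length : Nat) : Int), pvUpCount "") := by decide
  rw [h0, pv_loop strings ""]
  cases hf : strings.filter pvValid with
  | nil => simp [PySem.List.max?, pvUpCount]
  | cons x t =>
    have hvx : pvValid x = true := List.of_mem_filter (by rw [hf]; exact List.mem_cons_self)
    have hx : 0 < x.toList.length := pv_valid_pos x hvx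
    dsimp only
    rw [pv_max?_cons]
    simp only [List.foldl_cons]
    rw [if_pos (by simpa using hx)]
    rfl
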